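-- pv_equiv track=rewrite | github.com/larsonost/streamlit_kits | executable/instagram_analysis.py | format_instagram_comments
-- ===== SOURCE A (Python) =====
-- def format_instagram_comments(instagram: list) -> list:
--     """
--     Convert txt format of Instagram comments to list of comments
--     """
--     # Collect comments
--     lines = [comment.strip() for comment in instagram]
--
--     comments = []
--     for i, line in enumerate(lines):
--         if line.strip() == "":
--             if i + 2 < len(lines):
--                 comments.append(lines[i + 2].strip())
--
--     return comments
-- ===== SOURCE B (Python) =====
-- def format_instagram_comments(instagram: list) -> list:
--     """
--     Convert txt format of Instagram comments to list of comments
--     """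
--     comments = []
--     back2 = back1 = None
--     for raw in instagram:
--         cur = raw.strip()
--         if back2 == "":
--             comments.append(cur)
--         back2, back1 = back1, cur
--     return comments
-- ===== Notes on version B (the rewrite author's own statement) =====
-- stated objective: simpler
-- what changed: Replaces A's strip-all pre-pass plus enumerate with indexed lookup of lines[i+2] under an i+2<len bound check by one streaming pass with a two-slot shift register: each line is stripped exactly once (A strips the tested and appended lines again) and emitted when the line two positions back was blank.
import Mathlib
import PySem

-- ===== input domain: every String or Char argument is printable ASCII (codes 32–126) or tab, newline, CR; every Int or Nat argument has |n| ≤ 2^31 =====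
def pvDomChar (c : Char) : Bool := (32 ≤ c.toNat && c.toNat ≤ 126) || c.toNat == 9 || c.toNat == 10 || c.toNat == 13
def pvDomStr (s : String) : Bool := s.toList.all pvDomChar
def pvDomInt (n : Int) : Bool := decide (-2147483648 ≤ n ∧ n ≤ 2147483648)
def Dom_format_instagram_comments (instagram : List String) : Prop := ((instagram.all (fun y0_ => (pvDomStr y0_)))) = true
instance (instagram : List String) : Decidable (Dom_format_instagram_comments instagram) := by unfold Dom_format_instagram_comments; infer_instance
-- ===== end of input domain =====

-- B replaces A's strip-all pre-pass plus indexed lookup of lines[i+2] by one streaming pass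
-- with a two-slot shift register (each line stripped once; same return value).

-- ===== PORT A =====
def format_instagram_comments (instagram : List String) : List String :=
  let lines := instagram.map PySem.Str.strip
  (PySem.List.enumerate lines).foldl
    (fun comments p =>
      if PySem.Str.strip p.2 == "" then
        if p.1 + 2 < (lines.length : Int) then
          comments ++ [PySem.Str.strip ((PySem.List.pyGet? lines (p.1 + 2)).getD "")]
        else comments
      else comments) []

-- ===== PORT B =====
def format_instagram_comments_alt (instagram : List String) : List String :=
  (instagram.foldl
    (fun (st : List String × Option String × Option String) raw =>
      let cur := PySem.Str.strip raw
      let comments := if st.2.1 == some "" then st.1 ++ [cur] else st.1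
      (comments, st.2.2, some cur))
    ([], none, none)).1

-- ===== PRECONDITION & SPEC =====
def Spec_format_instagram_comments (instagram : List String) (out : List String) : Prop := out = format_instagram_comments_alt instagram
instance (instagram : List String) (out : List String) : Decidable (Spec_format_instagram_comments instagram out) := by unfold Spec_format_instagram_comments; infer_instance

-- ===== CLAIM (what is proved, stated in full; the proofs are below) =====
def Claim_equal_format_instagram_comments : Prop := ∀ (instagram : List String), Dom_format_instagram_comments instagram → Spec_format_instagram_comments instagram (format_instagram_comments instagram)

-- ===== LEMMAS AND PROOFS =====

lemma pv_dropWhile_idem {α : Type} (p : α → Bool) (l : List α) :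
    List.dropWhile p (List.dropWhile p l) = List.dropWhile p l := by
  rw [List.dropWhile_eq_self_iff]
  intro hl
  have h := List.head_dropWhile_not p (l := l) (by
    intro h; rw [h] at hl; simp at hl)
  simpa [List.head_eq_getElem] using h

lemma pv_rstrip_prefix (l : List Char) : PySem.Chars.rstrip l <+: l := by
  have h := List.dropWhile_suffix (l := l.reverse) PySem.Chars.isspace
  have := h.reverse
  simpa [PySem.Chars.rstrip] using this

lemma pv_lstrip_rstrip_lstrip (l : List Char) :
    PySem.Chars.lstrip (PySem.Chars.rstrip (PySem.Chars.lstrip l))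
      = PySem.Chars.rstrip (PySem.Chars.lstrip l) := by
  rcases hm : PySem.Chars.rstrip (PySem.Chars.lstrip l) with _ | ⟨x, m⟩
  · simp [PySem.Chars.lstrip]
  · have hpre : (x :: m) <+: PySem.Chars.lstrip l := hm ▸ pv_rstrip_prefix _
    rcases hpre with ⟨t, ht⟩
    have hx : PySem.Chars.isspace x = false := by
      have heq : List.dropWhile PySem.Chars.isspace l = x :: (m ++ t) := by
        rw [← PySem.Chars.lstrip, ← ht]; simp
      have := List.head_dropWhile_not PySem.Chars.isspace (l := l) (by simp [heq])
      simpa [heq] using this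
    simp [PySem.Chars.lstrip, hx]

lemma pv_rstrip_idem (l : List Char) :
    PySem.Chars.rstrip (PySem.Chars.rstrip l) = PySem.Chars.rstrip l := by
  simp [PySem.Chars.rstrip, pv_dropWhile_idem]

lemma pv_strip_idem (s : String) :
    PySem.Str.strip (PySem.Str.strip s) = PySem.Str.strip s := by
  rw [← String.toList_inj]
  simp only [PySem.Str.toList_strip]
  rw [PySem.Chars.strip, PySem.Chars.strip, pv_lstrip_rstrip_lstrip, pv_rstrip_idem]

-- the common target: the element two ahead of every blank line
def pvZipSpec (L : List String) : List String :=
  ((L.zip (L.drop 2)).filter (fun p => p.1 == "")).map (·.2)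

-- the loop body of port A, over the full stripped list L
def pvBody (L : List String) (comments : List String) (p : Int × String) : List String :=
  if PySem.Str.strip p.2 == "" then
    if p.1 + 2 < (L.length : Int) then
      comments ++ [PySem.Str.strip ((PySem.List.pyGet? L (p.1 + 2)).getD "")]
    else comments
  else comments

-- A's loop over the suffix of L starting at k equals pvZipSpec of that suffix.
lemma pv_aux (L : List String) (hL : ∀ s ∈ L, PySem.Str.strip s = s) :
    ∀ (S : List String) (k : Nat) (acc : List String), L.drop k = S →
    (PySem.List.enumerate S (k : Int)).foldl (pvBody L) acc = acc ++ pvZipSpec S := by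
  intro S
  induction S with
  | nil => intro k acc _; simp [PySem.List.enumerate, pvZipSpec]
  | cons s rest ih =>
    intro k acc hdrop
    have hk1 : L.drop (k + 1) = rest := by
      rw [← List.tail_drop, hdrop]; rfl
    have hsmem : s ∈ L := by
      have : s ∈ L.drop k := by rw [hdrop]; simp
      exact List.mem_of_mem_drop this
    have hs : PySem.Str.strip s = s := hL s hsmem
    have hlen : L.length = k + rest.length + 1 := by
      have hlt : k < L.length := by
        by_contra h
        rw [List.drop_eq_nil_of_le (by omega)] at hdrop
        simp at hdrop
      have := congrArg List.length hdrop
      simp [List.length_drop] at this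
      omega
    rw [PySem.List.enumerate_cons, List.foldl_cons]
    have hstep : (↑(k + 1) : Int) = (k : Int) + 1 := by push_cast; ring
    by_cases hse : s = ""
    · subst hse
      have hguard : ((k : Int) + 2 < (L.length : Int)) ↔ 1 < rest.length := by
        constructor <;> intro h <;> [omega; skip]
        · rw [hlen]; push_cast; omega
      by_cases hg : 1 < rest.length
      · rcases hd1 : rest.drop 1 with _ | ⟨t, u⟩
        · have := congrArg List.length hd1; simp at this; omega
        have hget : PySem.List.pyGet? L ((k : Int) + 2) = some t := by
          have : ((k : Int) + 2) = ((k + 2 : Nat) : Int) := by push_cast; ring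
          rw [this, PySem.List.pyGet?_natCast]
          have h2 : L[k + 2]? = (L.drop k)[2]? := (List.getElem?_drop).symm
          rw [h2, hdrop]
          show rest[1]? = some t
          have : rest[1]? = (rest.drop 1)[0]? := by
            rw [List.getElem?_drop]
          rw [this, hd1]; rfl
        have htmem : t ∈ L := by
          have : t ∈ rest.drop 1 := by rw [hd1]; simp
          exact List.mem_of_mem_drop (hk1 ▸ List.mem_of_mem_drop this)
        have ht : PySem.Str.strip t = t := hL t htmem
        have hbody : pvBody L acc ((k : Int), "") = acc ++ [t] := by
          simp only [pvBody]
          rw [if_pos (by simp [PySem.Str.strip, PySem.Chars.strip, PySem.Chars.lstrip, PySem.Chars.rstrip])]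
          rw [if_pos (hguard.mpr hg), hget]
          simp [ht]
        rw [hbody, ← hstep, ih (k + 1) (acc ++ [t]) hk1]
        have hzip : ("" :: rest).zip (("" :: rest).drop 2) = ("", t) :: rest.zip (rest.drop 2) := by
          show ("" :: rest).zip (rest.drop 1) = _
          rw [hd1]
          have : rest.drop 2 = u := by
            have : rest.drop 2 = (rest.drop 1).drop 1 := by rw [List.drop_drop]
            rw [this, hd1]; rfl
          rw [this]; rfl
        unfold pvZipSpec
        rw [hzip]
        simp
      · have hd1 : rest.drop 1 = [] := List.drop_eq_nil_of_le (by omega)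
        have hd2 : rest.drop 2 = [] := List.drop_eq_nil_of_le (by omega)
        have hbody : pvBody L acc ((k : Int), "") = acc := by
          simp only [pvBody]
          rw [if_pos (by simp [PySem.Str.strip, PySem.Chars.strip, PySem.Chars.lstrip, PySem.Chars.rstrip])]
          rw [if_neg (by rw [hguard]; omega)]
        rw [hbody, ← hstep, ih (k + 1) acc hk1]
        have hzip : ("" :: rest).zip (("" :: rest).drop 2) = [] := by
          show ("" :: rest).zip (rest.drop 1) = _
          rw [hd1]; simp
        unfold pvZipSpec
        rw [hzip, hd2]
        simp
    · have hbody : pvBody L acc ((k : Int), s) = acc := by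
        simp only [pvBody, hs]
        rw [if_neg (by simpa using hse)]
      rw [hbody, ← hstep, ih (k + 1) acc hk1]
      have hfilter : (((s :: rest).zip ((s :: rest).drop 2)).filter (fun p => p.1 == ""))
          = ((rest.zip (rest.drop 2)).filter (fun p => p.1 == "")) := by
        show (((s :: rest).zip (rest.drop 1)).filter _) = _
        rcases hd1 : rest.drop 1 with _ | ⟨t, u⟩
        · have hd2 : rest.drop 2 = [] := by
            have : rest.drop 2 = (rest.drop 1).drop 1 := by rw [List.drop_drop]
            rw [this, hd1]; rfl
          rw [hd2]; simp
        · have hd2 : rest.drop 2 = u := by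
            have : rest.drop 2 = (rest.drop 1).drop 1 := by rw [List.drop_drop]
            rw [this, hd1]; rfl
          rw [hd2]
          show List.filter _ ((s, t) :: rest.zip u) = _
          rw [List.filter_cons]
          simp [hse]
      unfold pvZipSpec
      rw [hfilter]

-- the residual emission of B's shift register holding (a, b) over remaining stripped lines T
def pvShift (a b : Option String) (T : List String) : List String :=
  match T with
  | [] => []
  | c :: r => (if a == some "" then [c] else []) ++ pvShift b (some c) r

lemma pv_fold_shift (xs : List String) :
    ∀ (acc : List String) (a b : Option String),
    (xs.foldl
      (fun (st : List String × Option String × Option String) raw =>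
        let cur := PySem.Str.strip raw
        let comments := if st.2.1 == some "" then st.1 ++ [cur] else st.1
        (comments, st.2.2, some cur))
      (acc, a, b)).1 = acc ++ pvShift a b (xs.map PySem.Str.strip) := by
  induction xs with
  | nil => intro acc a b; simp [pvShift]
  | cons x r ih =>
    intro acc a b
    rw [List.foldl_cons]
    simp only []
    rw [ih]
    by_cases ha : a == some ""
    · simp [pvShift, ha]
    · simp [pvShift, ha]

lemma pv_shift_some (T : List String) :
    ∀ (a b : String), pvShift (some a) (some b) T
      = ((( a :: b :: T).zip T).filter (fun p => p.1 == "")).map (·.2) := by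
  induction T with
  | nil => intro a b; simp [pvShift]
  | cons c r ih =>
    intro a b
    show (if (some a : Option String) == some "" then [c] else []) ++ pvShift (some b) (some c) r = _
    rw [ih]
    show _ = List.map _ (List.filter _ ((a, c) :: ((b :: c :: r).zip r)))
    rw [List.filter_cons]
    by_cases ha : a = "" <;> simp [ha]

lemma pv_shift_none (T : List String) : pvShift none none T = pvZipSpec T := by
  rcases T with _ | ⟨t, T⟩
  · simp [pvShift, pvZipSpec]
  rcases T with _ | ⟨u, T⟩
  · simp [pvShift, pvZipSpec]
  show pvShift (some t) (some u) T = _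
  rw [pv_shift_some]
  rfl

-- ===== VERDICT (by name: the statement is the Claim_ definition above) =====
theorem format_instagram_comments_spec : Claim_equal_format_instagram_comments := by
  intro instagram _
  show format_instagram_comments instagram = format_instagram_comments_alt instagram
  unfold format_instagram_comments format_instagram_comments_alt
  simp only []
  set L := instagram.map PySem.Str.strip with hLdef
  have hL : ∀ s ∈ L, PySem.Str.strip s = s := by
    intro s hsm
    rw [hLdef] at hsm
    rcases List.mem_map.mp hsm with ⟨t, _, rfl⟩
    exact pv_strip_idem t
  have h0 : ((0 : Nat) : Int) = 0 := rfl
  have hA := pv_aux L hL L 0 [] (by simp)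
  rw [h0] at hA
  have hB := pv_fold_shift instagram [] none none
  show (PySem.List.enumerate L 0).foldl (pvBody L) [] = _
  rw [hA, hB, ← hLdef, pv_shift_none]
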